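-- pv_equiv track=rewrite | github.com/AYUSHMIT/probabilistic-arithmetic | experiments/addition/data/generation.py | carry_labels
-- ===== SOURCE A (Python) =====
-- def carry_labels(number_labels, digits_per_number, numbers):
--     number_sum = []
--     carry = 0
--     for i in range(1, digits_per_number + 1):
--         digit_sum = 0
--         for j in range(numbers):
--             digit_sum += number_labels[j][-i]
--         digit_sum += carry
--         number_sum.append(digit_sum % 10)
--         carry = digit_sum // 10
--     number_sum.append(carry)
--     return number_sum
-- ===== SOURCE B (Python) =====
-- def carry_labels(number_labels, digits_per_number, numbers):
--     # Value each addend from its last digits_per_number digits (Horner over the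
--     # slice), sum those values, then peel the digits of the total back off.
--     total = 0
--     for row in number_labels[:max(numbers, 0)]:
--         v = 0
--         for digit in row[len(row) - digits_per_number:]:
--             v = v * 10 + digit
--         total += v
--     number_sum = []
--     for _ in range(digits_per_number):
--         number_sum.append(total % 10)
--         total //= 10
--     number_sum.append(total)
--     return number_sum
-- ===== Notes on version B (the rewrite author's own statement) =====
-- stated objective: alternative
-- what changed: B values each addend directly (Horner evaluation of its last digits_per_number digits obtained by slicing), sums those integer values, and peels the digits of the total off with mod/floordiv, instead of A's per-column summation with carry propagation.
import Mathlib
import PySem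

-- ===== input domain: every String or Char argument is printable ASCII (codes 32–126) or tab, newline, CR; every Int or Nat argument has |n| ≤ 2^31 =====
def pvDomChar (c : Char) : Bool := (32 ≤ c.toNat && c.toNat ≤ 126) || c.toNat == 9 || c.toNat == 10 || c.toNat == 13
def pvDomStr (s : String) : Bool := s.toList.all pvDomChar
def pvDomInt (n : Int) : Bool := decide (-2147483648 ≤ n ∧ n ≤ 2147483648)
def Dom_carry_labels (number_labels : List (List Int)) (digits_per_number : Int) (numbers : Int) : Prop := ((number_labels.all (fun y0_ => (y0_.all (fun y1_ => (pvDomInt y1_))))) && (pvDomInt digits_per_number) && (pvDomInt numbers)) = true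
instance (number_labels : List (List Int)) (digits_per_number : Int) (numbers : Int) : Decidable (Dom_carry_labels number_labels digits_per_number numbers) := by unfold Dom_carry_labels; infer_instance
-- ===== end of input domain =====

-- B values each addend by Horner evaluation of its sliced last digits, sums those
-- values and peels the total's digits off with mod/floordiv, instead of A's
-- per-column summation with carry propagation (alternative decomposition, same cost).


-- ===== PORT A =====
-- literal port of A: outer loop over i = 1..digits_per_number accumulating
-- (number_sum, carry); inner loop over j = 0..numbers-1 summing the column.
def carry_labels (number_labels : List (List Int)) (digits_per_number : Int) (numbers : Int) : List Int :=
  let r := (PySem.List.pyRange 1 (digits_per_number + 1) 1).foldl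
    (fun (st : List Int × Int) i =>
      let digit_sum := (PySem.List.pyRange 0 numbers 1).foldl
        (fun ds j => ds + PySem.List.pyGetD (PySem.List.pyGetD number_labels j []) (-i) 0) 0
      let digit_sum := digit_sum + st.2
      (st.1 ++ [PySem.Int.mod digit_sum 10], PySem.Int.floordiv digit_sum 10))
    ([], 0)
  r.1 ++ [r.2]

-- ===== PORT B =====
-- literal port of B: for each of the first max(numbers,0) rows, Horner-evaluate
-- the slice row[len(row)-digits_per_number:] and add it to total; then peel
-- digits_per_number digits off total and append the leftover.
def carry_labels_alt (number_labels : List (List Int)) (digits_per_number : Int) (numbers : Int) : List Int :=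
  let total := (PySem.List.slice number_labels none (some (max numbers 0))).foldl
    (fun t row =>
      t + (PySem.List.slice row (some ((row.length : Int) - digits_per_number)) none).foldl
            (fun v dig => v * 10 + dig) 0) 0
  let r := (PySem.List.pyRange 0 digits_per_number 1).foldl
    (fun (st : List Int × Int) _ =>
      (st.1 ++ [PySem.Int.mod st.2 10], PySem.Int.floordiv st.2 10))
    ([], total)
  r.1 ++ [r.2]

-- ===== PRECONDITION & SPEC =====
-- Pre_ excludes exactly the inputs where A raises IndexError: when the loops
-- actually index, every j < numbers must be a valid row index and every used
-- row must have at least digits_per_number digits.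
def Pre_carry_labels (number_labels : List (List Int)) (digits_per_number : Int) (numbers : Int) : Prop :=
  0 < digits_per_number → 0 < numbers →
    (numbers ≤ number_labels.length ∧
     ∀ row ∈ number_labels.take numbers.toNat, digits_per_number ≤ row.length)
instance (number_labels : List (List Int)) (digits_per_number : Int) (numbers : Int) : Decidable (Pre_carry_labels number_labels digits_per_number numbers) := by unfold Pre_carry_labels; infer_instance
def pvWitness_carry_labels : List (List Int) × Int × Int := ([[1, 2], [3, 4]], 2, 2)

def Spec_carry_labels (number_labels : List (List Int)) (digits_per_number : Int) (numbers : Int) (out : List Int) : Prop := out = carry_labels_alt number_labels digits_per_number numbers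
instance (number_labels : List (List Int)) (digits_per_number : Int) (numbers : Int) (out : List Int) : Decidable (Spec_carry_labels number_labels digits_per_number numbers out) := by unfold Spec_carry_labels; infer_instance

-- ===== CLAIM (what is proved, stated in full; the proofs are below) =====
def Claim_equal_carry_labels : Prop := ∀ (number_labels : List (List Int)) (digits_per_number : Int) (numbers : Int), Dom_carry_labels number_labels digits_per_number numbers → Pre_carry_labels number_labels digits_per_number numbers → Spec_carry_labels number_labels digits_per_number numbers (carry_labels number_labels digits_per_number numbers)

-- ===== LEMMAS AND PROOFS =====

-- A's column loop as structural recursion over the list of column sums.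
def pvCarryRun : List Int → Int → List Int × Int
  | [], c => ([], c)
  | x :: xs, c =>
    let p := pvCarryRun xs (PySem.Int.floordiv (x + c) 10)
    (PySem.Int.mod (x + c) 10 :: p.1, p.2)

-- base-10 value of a little-endian digit list (digits may be arbitrary ints)
def pvVal : List Int → Int
  | [] => 0
  | x :: xs => x + 10 * pvVal xs

-- B's peel-off loop as structural recursion on the count.
def pvDecomp : Nat → Int → List Int × Int
  | 0, s => ([], s)
  | n + 1, s =>
    let p := pvDecomp n (PySem.Int.floordiv s 10)
    (PySem.Int.mod s 10 :: p.1, p.2)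

theorem pvAfold (g : Int → Int) (is : List Int) (acc : List Int) (c : Int) :
    is.foldl (fun (st : List Int × Int) i =>
        (st.1 ++ [PySem.Int.mod (g i + st.2) 10], PySem.Int.floordiv (g i + st.2) 10)) (acc, c)
      = (acc ++ (pvCarryRun (is.map g) c).1, (pvCarryRun (is.map g) c).2) := by
  induction is generalizing acc c with
  | nil => simp [pvCarryRun]
  | cons x xs ih =>
    simp only [List.foldl_cons, List.map_cons, pvCarryRun, ih, List.append_assoc,
      List.singleton_append]

theorem pvBfold {α : Type} (L : List α) (acc : List Int) (s : Int) :
    L.foldl (fun (st : List Int × Int) _ =>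
        (st.1 ++ [PySem.Int.mod st.2 10], PySem.Int.floordiv st.2 10)) (acc, s)
      = (acc ++ (pvDecomp L.length s).1, (pvDecomp L.length s).2) := by
  induction L generalizing acc s with
  | nil => simp [pvDecomp]
  | cons x xs ih =>
    simp only [List.foldl_cons, List.length_cons, pvDecomp, ih, List.append_assoc,
      List.singleton_append]

-- carry propagation over the column list computes the digit decomposition of its value
theorem pvCore (cs : List Int) (c : Int) :
    pvCarryRun cs c = pvDecomp cs.length (pvVal cs + c) := by
  induction cs generalizing c with
  | nil => simp [pvCarryRun, pvVal, pvDecomp]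
  | cons x xs ih =>
    have h10 : (0 : Int) < 10 := by norm_num
    have h1 : PySem.Int.mod (x + 10 * pvVal xs + c) 10 = PySem.Int.mod (x + c) 10 := by
      rw [PySem.Int.mod_eq_emod_of_pos h10, PySem.Int.mod_eq_emod_of_pos h10]; omega
    have h2 : PySem.Int.floordiv (x + 10 * pvVal xs + c) 10
        = pvVal xs + PySem.Int.floordiv (x + c) 10 := by
      rw [PySem.Int.floordiv_eq_ediv_of_pos h10, PySem.Int.floordiv_eq_ediv_of_pos h10]; omega
    have h3 : pvDecomp xs.length (PySem.Int.floordiv (x + 10 * pvVal xs + c) 10)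
        = pvCarryRun xs (PySem.Int.floordiv (x + c) 10) := by
      rw [h2, ih]
    simp only [pvCarryRun, pvVal, List.length_cons, pvDecomp]
    rw [h1, h3]

theorem pvValAppend (ys : List Int) (x : Int) :
    pvVal (ys ++ [x]) = pvVal ys + x * 10 ^ ys.length := by
  induction ys with
  | nil => simp [pvVal]
  | cons y ys ih => simp [pvVal, ih, pow_succ]; ring

-- B's Horner loop computes the value of the reversed digit list
theorem pvHorner (bs : List Int) : ∀ a : Int,
    bs.foldl (fun v dig => v * 10 + dig) a = pvVal bs.reverse + a * 10 ^ bs.length := by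
  induction bs with
  | nil => intro a; simp [pvVal]
  | cons b bs ih =>
    intro a
    simp only [List.foldl_cons, List.reverse_cons, ih, pvValAppend, List.length_reverse,
      List.length_cons, pow_succ]
    ring

theorem pvValMapAdd (J : List Int) (f g : Int → Int) :
    pvVal (J.map (fun i => f i + g i)) = pvVal (J.map f) + pvVal (J.map g) := by
  induction J with
  | nil => simp [pvVal]
  | cons j J ih => simp [pvVal, ih]; ring

theorem pvValMapZero (J : List Int) : pvVal (J.map (fun _ => (0 : Int))) = 0 := by
  induction J with
  | nil => rfl
  | cons j J ih => simp only [List.map_cons, pvVal, ih]; ring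

-- linearity: the value of a column-sum list is the sum of the per-row values
theorem pvValMapSum {α : Type} (J : List Int) (F : α → Int → Int) (R : List α) :
    pvVal (J.map (fun i => (R.map (fun r => F r i)).sum))
      = (R.map (fun r => pvVal (J.map (F r)))).sum := by
  induction R with
  | nil => simpa using pvValMapZero J
  | cons r R ih =>
    simp only [List.map_cons, List.sum_cons]
    rw [← ih, ← pvValMapAdd]

-- 'for j in range(numbers): xs[j]' enumerates the first numbers rows
theorem pvRangeMapGet {α : Type} (xs : List α) (d : α) (n : Int) (_hn : 0 ≤ n)
    (h : n ≤ xs.length) :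
    (PySem.List.pyRange 0 n 1).map (fun j => PySem.List.pyGetD xs j d) = xs.take n.toNat := by
  apply List.ext_getElem
  · simp [PySem.List.length_pyRange_one]; omega
  · intro k hk1 hk2
    have hkn : k < n.toNat := by
      simpa [PySem.List.length_pyRange_one] using hk1
    have hklen : k < xs.length := by omega
    simp only [List.getElem_map, PySem.List.getElem_pyRange_one, List.getElem_take]
    rw [PySem.List.pyGetD_eq_getElem xs d (by omega) (by push_cast; omega)]
    congr 1
    omega

-- the column reads row[-1], …, row[-e]: that is the reverse of the last e digits
theorem pvNegIdx (row : List Int) (e : Nat) (he : e ≤ row.length) :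
    (PySem.List.pyRange 1 ((e : Int) + 1) 1).map (fun i => PySem.List.pyGetD row (-i) 0)
      = (row.drop (row.length - e)).reverse := by
  apply List.ext_getElem
  · simp [PySem.List.length_pyRange_one]; omega
  · intro k hk1 hk2
    have hke : k < e := by
      simpa [PySem.List.length_pyRange_one] using hk1
    simp only [List.getElem_map, PySem.List.getElem_pyRange_one, List.getElem_reverse,
      List.getElem_drop]
    have hcast : -((1 : Int) + (k : Int)) = -(((k + 1 : Nat) : Int)) := by omega
    rw [hcast, PySem.List.pyGetD_neg_natCast row (k + 1) 0 (by omega) (by omega)]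
    congr 1
    simp only [List.length_drop]
    omega

theorem ports_eq (number_labels : List (List Int)) (digits_per_number : Int) (numbers : Int)
    (hp : Pre_carry_labels number_labels digits_per_number numbers) :
    carry_labels number_labels digits_per_number numbers
      = carry_labels_alt number_labels digits_per_number numbers := by
  simp only [carry_labels, carry_labels_alt]
  by_cases hd : digits_per_number <= 0
  · -- both loops over digits are empty, and every B slice is empty: both return [0]
    rw [PySem.List.pyRange_one_eq_nil (show digits_per_number + 1 <= 1 by omega),
      PySem.List.pyRange_one_eq_nil (show digits_per_number <= 0 by omega)]
    have hsl : ∀ row : List Int,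
        PySem.List.slice row (some ((row.length : Int) - digits_per_number)) none = [] := by
      intro row
      rw [PySem.List.slice_from row (by omega)]
      exact List.drop_eq_nil_of_le (by omega)
    have h0 : (PySem.List.slice number_labels none (some (max numbers 0))).foldl
        (fun t row => t + (PySem.List.slice row (some ((row.length : Int) - digits_per_number))
          none).foldl (fun v dig => v * 10 + dig) 0) 0 = 0 := by
      rw [PySem.List.foldl_add]
      simp [hsl]
    rw [h0]
    rfl
  · -- 0 < digits_per_number
    have hd : 0 < digits_per_number := by omega
    -- the two totals coincide
    have hval :
        pvVal ((PySem.List.pyRange 1 (digits_per_number + 1) 1).map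
            (fun i => (PySem.List.pyRange 0 numbers 1).foldl
              (fun ds j => ds + PySem.List.pyGetD (PySem.List.pyGetD number_labels j []) (-i) 0)
              0)) + 0
          = (PySem.List.slice number_labels none (some (max numbers 0))).foldl
              (fun t row => t + (PySem.List.slice row
                (some ((row.length : Int) - digits_per_number)) none).foldl
                  (fun v dig => v * 10 + dig) 0) 0 := by
      rw [add_zero]
      by_cases hn : numbers <= 0
      · -- no rows used on either side: both totals are 0
        rw [PySem.List.pyRange_one_eq_nil (show numbers <= 0 by omega)]
        have hmax : max numbers 0 = 0 := by omega
        rw [hmax, PySem.List.slice_to number_labels (by omega)]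
        simp only [Int.toNat_zero, List.take_zero, List.foldl_nil]
        exact pvValMapZero (PySem.List.pyRange 1 (digits_per_number + 1) 1)
      · have hn : 0 < numbers := by omega
        obtain ⟨hle, hrows⟩ := hp hd hn
        have hmax : max numbers 0 = numbers := by omega
        rw [hmax, PySem.List.slice_to number_labels (by omega), PySem.List.foldl_add, zero_add]
        -- A's inner loop is a sum over the first `numbers` rows
        have hinner : (fun i => (PySem.List.pyRange 0 numbers 1).foldl
            (fun ds j => ds + PySem.List.pyGetD (PySem.List.pyGetD number_labels j []) (-i) 0) 0)
            = fun i => ((number_labels.take numbers.toNat).map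
                (fun row => PySem.List.pyGetD row (-i) 0)).sum := by
          funext i
          rw [PySem.List.foldl_add, zero_add]
          have hmm : (PySem.List.pyRange 0 numbers 1).map
              (fun j => PySem.List.pyGetD (PySem.List.pyGetD number_labels j []) (-i) 0)
              = ((PySem.List.pyRange 0 numbers 1).map
                  (fun j => PySem.List.pyGetD number_labels j [])).map
                    (fun row => PySem.List.pyGetD row (-i) 0) := by
            rw [List.map_map]
            rfl
          rw [hmm, pvRangeMapGet number_labels [] numbers (by omega) hle]
        rw [hinner]
        rw [pvValMapSum (PySem.List.pyRange 1 (digits_per_number + 1) 1)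
          (fun row i => PySem.List.pyGetD row (-i) 0) (number_labels.take numbers.toNat)]
        -- per-row: value of the negative-index reads = Horner value of the slice
        apply congrArg
        apply List.map_congr_left
        intro row hrow
        have hrlen : digits_per_number <= row.length := hrows row hrow
        have hde : digits_per_number + 1 = (digits_per_number.toNat : Int) + 1 := by omega
        rw [hde, pvNegIdx row digits_per_number.toNat (by omega)]
        rw [PySem.List.slice_from row (by omega)]
        have hdrop : ((row.length : Int) - digits_per_number).toNat
            = row.length - digits_per_number.toNat := by omega
        rw [hdrop, pvHorner, mul_comm]
        simp
    -- A side: fold shape, then carry run = decomposition of the column value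
    rw [pvAfold (fun i => (PySem.List.pyRange 0 numbers 1).foldl
        (fun ds j => ds + PySem.List.pyGetD (PySem.List.pyGetD number_labels j []) (-i) 0) 0)]
    rw [pvCore]
    -- B side: fold shape
    rw [pvBfold]
    simp only [List.length_map, PySem.List.length_pyRange_one]
    rw [hval]
    have hlen : ((digits_per_number + 1) - 1).toNat = (digits_per_number - 0).toNat := by omega
    rw [hlen]

-- ===== VERDICT (by name: the statement is the Claim_ definition above) =====
theorem carry_labels_spec : Claim_equal_carry_labels := by
  intro number_labels digits_per_number numbers _ hp
  unfold Spec_carry_labels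
  exact ports_eq number_labels digits_per_number numbers hp
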